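-- pv_equiv track=rewrite | github.com/isaiahJ93/factortrace | migrate_v4_complete.py | extract_future_imports
-- ===== SOURCE A (Python) =====
-- from typing import Dict, List, Tuple, Set, Optional, Any
--
-- def extract_future_imports(source: str) -> List[str]:
--     """Extract __future__ imports from source"""
--     future_imports = []
--     for line in source.split('\n'):
--         if line.strip().startswith('from __future__ import'):
--             future_imports.append(line.strip())
--         elif line.strip() and not line.strip().startswith('#'):
--             # Stop at first non-comment, non-future import
--             break
--     return future_imports
-- ===== SOURCE B (Python) =====
-- from functools import reduce
--
-- def extract_future_imports(source: str):
--     """Extract __future__ imports from source"""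
--     # Right fold with reset: scan lines from the END; a future import prepends
--     # its stripped text, blank/comment lines pass the suffix result through,
--     # and any real statement line resets the result to [] (discarding all
--     # later collections). This equals collecting future imports before the
--     # first real statement, with no stop index or break.
--     def step(line, acc):
--         s = line.strip()
--         if s.startswith('from __future__ import'):
--             return [s] + acc
--         if not s or s.startswith('#'):
--             return acc
--         return []
--     return reduce(lambda acc, line: step(line, acc), reversed(source.split('\n')), [])
-- ===== Notes on version B (the rewrite author's own statement) =====
-- stated objective: alternative
-- what changed: Replaces the left-to-right break-loop with a right fold over the lines: scanning from the end, a future-import line prepends its stripped text, blank/comment lines pass the suffix result through, and any real statement line resets the accumulator to [], so no stop boundary or break is ever computed.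
import Mathlib
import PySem

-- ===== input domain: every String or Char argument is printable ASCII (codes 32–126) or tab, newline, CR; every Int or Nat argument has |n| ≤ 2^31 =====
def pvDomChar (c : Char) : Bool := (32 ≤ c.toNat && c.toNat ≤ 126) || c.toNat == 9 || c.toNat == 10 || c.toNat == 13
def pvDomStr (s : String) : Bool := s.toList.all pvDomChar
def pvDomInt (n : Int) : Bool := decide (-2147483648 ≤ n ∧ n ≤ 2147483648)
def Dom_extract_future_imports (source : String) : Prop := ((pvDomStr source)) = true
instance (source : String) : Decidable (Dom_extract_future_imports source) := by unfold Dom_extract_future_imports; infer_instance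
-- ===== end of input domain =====

-- B: right fold with reset — scans lines from the end, a real statement line resets the result to []; same O(n) cost, no break/stop index.


-- ===== PORT A =====
-- the for-loop with accumulator and break
def pvLoopA (fi : List String) : List String → List String
  | [] => fi
  | line :: rest =>
      let s := PySem.Str.strip line
      if PySem.Str.startswith s "from __future__ import" then
        pvLoopA (fi ++ [s]) rest
      else if (s != "") && !(PySem.Str.startswith s "#") then
        fi  -- break: return what was accumulated
      else
        pvLoopA fi rest

def extract_future_imports (source : String) : List String :=
  pvLoopA [] ((PySem.Str.split? source "\n").getD [])  -- sep "\n" ≠ "", so split? is some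

-- ===== PORT B =====
-- step(line, acc) of the right fold
def pvStepB (line : String) (acc : List String) : List String :=
  let s := PySem.Str.strip line
  if PySem.Str.startswith s "from __future__ import" then
    s :: acc
  else if (s == "") || PySem.Str.startswith s "#" then
    acc
  else
    []

-- reduce over reversed(lines) with step(line, acc) is List.foldr pvStepB []
def extract_future_imports_alt (source : String) : List String :=
  List.foldr pvStepB [] ((PySem.Str.split? source "\n").getD [])  -- sep "\n" ≠ "", so split? is some

-- ===== PRECONDITION & SPEC =====
def Spec_extract_future_imports (source : String) (out : List String) : Prop := out = extract_future_imports_alt source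
instance (source : String) (out : List String) : Decidable (Spec_extract_future_imports source out) := by unfold Spec_extract_future_imports; infer_instance

-- ===== CLAIM (what is proved, stated in full; the proofs are below) =====
def Claim_equal_extract_future_imports : Prop := ∀ (source : String), Dom_extract_future_imports source → Spec_extract_future_imports source (extract_future_imports source)

-- ===== LEMMAS AND PROOFS =====
theorem pvLoopA_eq (ls : List String) : ∀ acc, pvLoopA acc ls = acc ++ List.foldr pvStepB [] ls := by
  induction ls with
  | nil => intro acc; simp [pvLoopA]
  | cons l rest ih =>
    intro acc
    simp only [List.foldr_cons]
    by_cases hf : PySem.Str.startswith (PySem.Str.strip l) "from __future__ import" = true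
    · simp only [pvLoopA, pvStepB, hf, if_true, ih, List.append_assoc, List.singleton_append]
    · rw [Bool.not_eq_true] at hf
      by_cases hb : ((PySem.Str.strip l != "") && !(PySem.Str.startswith (PySem.Str.strip l) "#")) = true
      · obtain ⟨h1, h2⟩ := Bool.and_eq_true_iff.mp hb
        rw [Bool.not_eq_true'] at h2
        have he : (PySem.Str.strip l == "") = false := by
          cases hbe : (PySem.Str.strip l == "") with
          | false => rfl
          | true => rw [bne_iff_ne] at h1; exact absurd (by simpa using hbe) h1
        simp only [pvLoopA, pvStepB, hf, Bool.false_eq_true, if_false, if_true,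
          he, h2, Bool.or_false, Bool.not_false, Bool.and_true, h1, List.append_nil]
      · rw [Bool.not_eq_true] at hb
        have hk : ((PySem.Str.strip l == "") || PySem.Str.startswith (PySem.Str.strip l) "#") = true := by
          rcases Bool.and_eq_false_iff.mp hb with h1 | h2
          · have : (PySem.Str.strip l == "") = true := by simpa using h1
            simp [this]
          · have : PySem.Str.startswith (PySem.Str.strip l) "#" = true := by simpa using h2
            simp only [this, Bool.or_true]
        simp only [pvLoopA, pvStepB, hf, Bool.false_eq_true, if_false, hb, hk, if_true, ih]

-- ===== VERDICT (by name: the statement is the Claim_ definition above) =====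
theorem extract_future_imports_spec : Claim_equal_extract_future_imports := by
  intro source _
  show extract_future_imports source = extract_future_imports_alt source
  rw [extract_future_imports, extract_future_imports_alt, pvLoopA_eq]
  rfl
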